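-- pv_equiv track=rewrite | github.com/QuBenhao/LeetCode | problems/problems_2071/solution.py | maxTaskAssign
-- ===== SOURCE A (Python) =====
-- from typing import List
--
-- from bisect import bisect_left
-- from collections import deque
--
-- def maxTaskAssign(tasks: List[int], workers: List[int], pills: int, strength: int) -> int:
--     tasks.sort()
--     workers.sort()
--
--     def check(k: int) -> bool:
--         k += 1  # 二分最小的无法完成的 k+1，那么最终的 k 就是最大的可以完成的 k
--         # 贪心：用最强的 k 名工人，完成最简单的 k 个任务
--         i, p = 0, pills
--         valid_tasks = deque()
--         for w in workers[-k:]:  # 枚举工人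
--             # 在吃药的情况下，把能完成的任务记录到 valid_tasks 中
--             while i < k and tasks[i] <= w + strength:
--                 valid_tasks.append(tasks[i])
--                 i += 1
--             # 即使吃药也无法完成任务
--             if not valid_tasks:
--                 return True
--             # 无需吃药就能完成（最简单的）任务
--             if w >= valid_tasks[0]:
--                 valid_tasks.popleft()
--                 continue
--             # 必须吃药
--             if p == 0:  # 没药了
--                 return True
--             p -= 1
--             # 完成（能完成的）最难的任务
--             valid_tasks.pop()
--         return False
--
--     return bisect_left(range(min(len(tasks), len(workers))), True, key=check)
-- ===== SOURCE B (Python) =====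
-- from typing import List
-- from bisect import bisect_right
--
--
-- def maxTaskAssign(tasks: List[int], workers: List[int], pills: int, strength: int) -> int:
--     ts = sorted(tasks)
--     ws = sorted(workers)
--
--     def feasible(k: int) -> bool:
--         # can the k strongest workers, weakest first, finish the k easiest tasks?
--         rem = ts[:k]          # sorted list of still-unassigned tasks
--         p = pills
--         for w in ws[len(ws) - k:]:
--             if not rem or rem[0] > w + strength:
--                 return False  # even with a pill no task is doable
--             if w >= rem[0]:
--                 del rem[0]    # easiest task, no pill needed
--             elif p == 0:
--                 return False  # a pill is required but none is left
--             else: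
--                 p -= 1
--                 del rem[bisect_right(rem, w + strength) - 1]  # hardest doable task, with a pill
--         return True
--
--     lo, hi = 0, min(len(ts), len(ws))
--     while lo < hi:
--         mid = (lo + hi) // 2
--         if feasible(mid + 1):
--             lo = mid + 1
--         else:
--             hi = mid
--     return lo
-- ===== Notes on version B (the rewrite author's own statement) =====
-- stated objective: alternative
-- what changed: check() is rebuilt: instead of A's task pointer feeding a persistent deque of pill-doable tasks across workers, B keeps one sorted list of the unassigned easy tasks and per worker binary-searches (bisect_right) the hardest task doable with a pill, deleting by index; the outer bisect_left-with-key is an explicit lo/hi binary-search loop.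
import Mathlib
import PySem

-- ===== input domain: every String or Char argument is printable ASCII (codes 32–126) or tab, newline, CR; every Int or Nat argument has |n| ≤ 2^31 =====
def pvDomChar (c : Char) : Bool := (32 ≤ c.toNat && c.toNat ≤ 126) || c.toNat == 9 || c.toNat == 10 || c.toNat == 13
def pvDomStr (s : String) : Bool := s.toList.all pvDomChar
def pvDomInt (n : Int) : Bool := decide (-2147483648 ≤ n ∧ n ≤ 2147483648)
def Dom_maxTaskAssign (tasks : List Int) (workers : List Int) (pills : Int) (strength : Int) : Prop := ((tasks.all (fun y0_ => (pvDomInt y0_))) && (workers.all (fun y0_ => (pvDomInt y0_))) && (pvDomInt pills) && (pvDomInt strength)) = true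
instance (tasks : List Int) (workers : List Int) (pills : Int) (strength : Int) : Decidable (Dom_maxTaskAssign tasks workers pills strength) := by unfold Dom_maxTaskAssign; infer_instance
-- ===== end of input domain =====

-- B replaces A's pointer-fed deque check by a sorted remaining-task list probed with bisect_right,
-- and the bisect_left-with-key outer search by an explicit lo/hi loop (objective: alternative;
-- A sorts its arguments in place, B does not — the equivalence is about the return value).

-- ===== PORT A =====
-- the `while i < k and tasks[i] <= w + strength` loop (tasks[i] read as getD: A only calls it with i < k ≤ len(tasks))
def pvFillA (ts : List Int) (k' : Nat) (v : Int) : Nat → Nat → List Int → Nat × List Int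
  | 0, i, d => (i, d)
  | n + 1, i, d =>
    if i < k' ∧ ts.getD i 0 ≤ v then pvFillA ts k' v n (i + 1) (d ++ [ts.getD i 0])
    else (i, d)

-- the `for w in workers[-k:]` loop of A's check, state: task pointer i, pills p, deque d
def pvGoA (ts : List Int) (k' : Nat) (strength : Int) : List Int → Nat → Int → List Int → Bool
  | [], _, _, _ => false
  | w :: rest, i, p, d =>
    let r := pvFillA ts k' (w + strength) (k' - i) i d
    match r.2 with
    | [] => true
    | t :: dt =>
      if t ≤ w then pvGoA ts k' strength rest r.1 p dt
      else if p = 0 then true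
      else pvGoA ts k' strength rest r.1 (p - 1) ((t :: dt).dropLast)

def pvCheckA (ts ws : List Int) (pills strength : Int) (k : Nat) : Bool :=
  pvGoA ts (k + 1) strength (PySem.List.slice ws (some (-((k + 1 : Nat) : Int))) none) 0 pills []

-- bisect_left(range(m), True, key=check): lo=mid+1 iff check(mid) < True, i.e. check(mid) = False
def pvBisectA (ch : Nat → Bool) : Nat → Nat → Nat → Nat
  | 0, lo, _ => lo
  | n + 1, lo, hi =>
    if lo < hi then
      if ch ((lo + hi) / 2) then pvBisectA ch n lo ((lo + hi) / 2)
      else pvBisectA ch n ((lo + hi) / 2 + 1) hi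
    else lo

def maxTaskAssign (tasks : List Int) (workers : List Int) (pills : Int) (strength : Int) : Int :=
  let ts := PySem.List.sorted tasks (fun x => x)
  let ws := PySem.List.sorted workers (fun x => x)
  ((pvBisectA (pvCheckA ts ws pills strength) (min ts.length ws.length) 0 (min ts.length ws.length) : Nat) : Int)

-- ===== PORT B =====
-- the `for w in ws[len(ws)-k:]` loop of B's feasible, state: remaining sorted tasks rem, pills p
def pvGoB (strength : Int) : List Int → List Int → Int → Bool
  | [], _, _ => true
  | w :: rest, rem, p =>
    match rem with
    | [] => false
    | t :: rtl =>
      if w + strength < t then false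
      else if t ≤ w then pvGoB strength rest rtl p
      else if p = 0 then false
      else pvGoB strength rest
        ((t :: rtl).eraseIdx (PySem.List.bisectRight (t :: rtl) (w + strength) - 1)) (p - 1)

def pvFeasibleB (ts ws : List Int) (pills strength : Int) (k : Nat) : Bool :=
  pvGoB strength (ws.drop (ws.length - k)) (ts.take k) pills

-- the explicit `while lo < hi` binary search of B
def pvSearchB (fe : Nat → Bool) : Nat → Nat → Nat → Nat
  | 0, lo, _ => lo
  | n + 1, lo, hi =>
    if lo < hi then
      if fe ((lo + hi) / 2 + 1) then pvSearchB fe n ((lo + hi) / 2 + 1) hi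
      else pvSearchB fe n lo ((lo + hi) / 2)
    else lo

def maxTaskAssign_alt (tasks : List Int) (workers : List Int) (pills : Int) (strength : Int) : Int :=
  let ts := PySem.List.sorted tasks (fun x => x)
  let ws := PySem.List.sorted workers (fun x => x)
  ((pvSearchB (pvFeasibleB ts ws pills strength) (min ts.length ws.length) 0 (min ts.length ws.length) : Nat) : Int)

-- ===== PRECONDITION & SPEC =====
def Spec_maxTaskAssign (tasks : List Int) (workers : List Int) (pills : Int) (strength : Int) (out : Int) : Prop := out = maxTaskAssign_alt tasks workers pills strength
instance (tasks : List Int) (workers : List Int) (pills : Int) (strength : Int) (out : Int) : Decidable (Spec_maxTaskAssign tasks workers pills strength out) := by unfold Spec_maxTaskAssign; infer_instance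

-- ===== CLAIM (what is proved, stated in full; the proofs are below) =====
def Claim_equal_maxTaskAssign : Prop := ∀ (tasks : List Int) (workers : List Int) (pills : Int) (strength : Int), Dom_maxTaskAssign tasks workers pills strength → Spec_maxTaskAssign tasks workers pills strength (maxTaskAssign tasks workers pills strength)

-- ===== LEMMAS AND PROOFS =====

theorem pvEraseIdx_last : ∀ (l : List Int), l.eraseIdx (l.length - 1) = l.dropLast
  | [] => rfl
  | [_] => rfl
  | a :: b :: l => by
    have ih := pvEraseIdx_last (b :: l)
    have hlen : (a :: b :: l).length - 1 = l.length + 1 := by simp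
    rw [hlen, List.eraseIdx_cons_succ, List.dropLast_cons₂]
    have : (b :: l).length - 1 = l.length := by simp
    rw [this] at ih
    rw [ih]

-- characterisation of A's inner while loop
theorem pvFillA_spec (ts : List Int) (k' : Nat) (v : Int) (hk : k' ≤ ts.length) :
    ∀ (n i : Nat) (d : List Int), k' - i ≤ n → i ≤ k' →
      i ≤ (pvFillA ts k' v n i d).1 ∧ (pvFillA ts k' v n i d).1 ≤ k' ∧
      (pvFillA ts k' v n i d).2 =
        d ++ ((ts.take k').drop i).take ((pvFillA ts k' v n i d).1 - i) ∧
      (∀ j, i ≤ j → j < (pvFillA ts k' v n i d).1 → ts.getD j 0 ≤ v) ∧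
      ((pvFillA ts k' v n i d).1 < k' → v < ts.getD (pvFillA ts k' v n i d).1 0) := by
  intro n
  induction n with
  | zero =>
    intro i d hn hik
    have hik' : i = k' := by omega
    refine ⟨le_refl _, hik, by simp [pvFillA], ?_, ?_⟩
    · intro j hj1 hj2
      exact absurd (Nat.lt_of_le_of_lt hj1 hj2) (Nat.lt_irrefl i)
    · intro hlt
      exact absurd (show i < k' from hlt) (by omega)
  | succ n ih =>
    intro i d hn hik
    show _ ∧ _
    rw [pvFillA]
    by_cases hcond : i < k' ∧ ts.getD i 0 ≤ v
    · rw [if_pos hcond]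
      obtain ⟨h1, h2, h3, h4, h5⟩ := ih (i + 1) (d ++ [ts.getD i 0]) (by omega) (by omega)
      refine ⟨by omega, h2, ?_, ?_, h5⟩
      · rw [h3]
        have hlen : i < (ts.take k').length := by
          simp only [List.length_take]; omega
        have hdrop : (ts.take k').drop i = ts.getD i 0 :: (ts.take k').drop (i + 1) := by
          rw [List.drop_eq_getElem_cons hlen]
          congr 1
          rw [List.getElem_take, List.getD_eq_getElem ts 0 (by omega)]
        rw [hdrop]
        have hstep : (pvFillA ts k' v n (i + 1) (d ++ [ts.getD i 0])).1 - i
            = ((pvFillA ts k' v n (i + 1) (d ++ [ts.getD i 0])).1 - (i + 1)) + 1 := by omega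
        rw [hstep, List.take_succ_cons]
        simp [List.append_assoc]
      · intro j hj1 hj2
        by_cases hji : j = i
        · subst hji; exact hcond.2
        · exact h4 j (by omega) hj2
    · rw [if_neg hcond]
      refine ⟨le_refl _, hik, by simp, ?_, ?_⟩
      · intro j hj1 hj2
        exact absurd (Nat.lt_of_le_of_lt hj1 hj2) (Nat.lt_irrefl i)
      · intro hlt
        by_contra hle
        push Not at hle
        exact hcond ⟨hlt, hle⟩

-- bisect_right of a (≤ v) / (> v) decomposition of a sorted list is the split point
theorem pvBisect_decomp (a b : List Int) (v : Int)
    (hs : (a ++ b).Pairwise (· ≤ ·))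
    (ha : ∀ x ∈ a, x ≤ v) (hb : ∀ x ∈ b, v < x) :
    PySem.List.bisectRight (a ++ b) v = a.length := by
  obtain ⟨hle, hlt, hgt⟩ := PySem.List.bisectRight_spec (a ++ b) v hs
  rcases lt_trichotomy (PySem.List.bisectRight (a ++ b) v) a.length with h | h | h
  · exfalso
    have hra : PySem.List.bisectRight (a ++ b) v < (a ++ b).length := by
      simp only [List.length_append]; omega
    have hv := hgt _ hra (le_refl _)
    rw [List.getElem_append_left h] at hv
    exact absurd (ha _ (List.getElem_mem _)) (not_le.mpr hv)
  · exact h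
  · exfalso
    have hlenle := hle
    simp only [List.length_append] at hlenle
    have hb0 : a.length < (a ++ b).length := by
      simp only [List.length_append]; omega
    have hv := hlt a.length hb0 h
    rw [List.getElem_append_right (le_refl _)] at hv
    exact absurd hv (not_le.mpr (hb _ (List.getElem_mem _)))

-- bisimulation of A's deque loop with B's sorted-list loop
theorem pvGoAB (ts : List Int) (k' : Nat) (strength : Int)
    (hts : ts.Pairwise (· ≤ ·)) (hk : k' ≤ ts.length) :
    ∀ (ws' : List Int) (i : Nat) (p : Int) (d : List Int),
      ws'.Pairwise (· ≤ ·) → i ≤ k' → d.Sublist (ts.take i) →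
      (∀ x ∈ d, ∀ w ∈ ws', x ≤ w + strength) →
      pvGoA ts k' strength ws' i p d =
        ! pvGoB strength ws' (d ++ (ts.take k').drop i) p := by
  intro ws'
  induction ws' with
  | nil =>
    intro i p d _ _ _ _
    simp [pvGoA, pvGoB]
  | cons w rest ih =>
    intro i p d hws hik hsub hdle
    obtain ⟨hwr, hrest⟩ := List.pairwise_cons.mp hws
    obtain ⟨h1, h2, h3, h4, h5⟩ :=
      pvFillA_spec ts k' (w + strength) hk (k' - i) i d (le_refl _) hik
    have htklen : (ts.take k').length = k' := by
      simp only [List.length_take]; omega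
    have hseg : d ++ (ts.take k').drop i =
        (pvFillA ts k' (w + strength) (k' - i) i d).2 ++ (ts.take k').drop (pvFillA ts k' (w + strength) (k' - i) i d).1 := by
      rw [h3, List.append_assoc]
      congr 1
      have hdd : (ts.take k').drop (pvFillA ts k' (w + strength) (k' - i) i d).1
          = ((ts.take k').drop i).drop ((pvFillA ts k' (w + strength) (k' - i) i d).1 - i) := by
        rw [List.drop_drop]; congr 1; omega
      rw [hdd, List.take_append_drop]
    have hr2le : ∀ x ∈ (pvFillA ts k' (w + strength) (k' - i) i d).2, x ≤ w + strength := by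
      rw [h3]
      intro x hx
      rcases List.mem_append.mp hx with hxd | hxs
      · exact hdle x hxd w (List.mem_cons_self)
      · obtain ⟨m, hm, rfl⟩ := List.mem_iff_getElem.mp hxs
        have hm' : m < (pvFillA ts k' (w + strength) (k' - i) i d).1 - i := by
          have := hm
          simp only [List.length_take, List.length_drop, htklen] at this
          omega
        rw [List.getElem_take, List.getElem_drop, List.getElem_take,
          ← List.getD_eq_getElem ts 0 (by omega)]
        exact h4 (i + m) (by omega) (by omega)
    have hrest_gt : ∀ x ∈ (ts.take k').drop (pvFillA ts k' (w + strength) (k' - i) i d).1, w + strength < x := by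
      intro x hx
      obtain ⟨m, hm, rfl⟩ := List.mem_iff_getElem.mp hx
      have hmlen : (pvFillA ts k' (w + strength) (k' - i) i d).1 + m < k' := by
        simp only [List.length_drop, htklen] at hm
        omega
      have hi'k : (pvFillA ts k' (w + strength) (k' - i) i d).1 < k' := by omega
      have hbase := h5 hi'k
      rw [List.getD_eq_getElem ts 0 (by omega)] at hbase
      rw [List.getElem_drop, List.getElem_take]
      rcases Nat.eq_zero_or_pos m with rfl | hm0
      · simpa using hbase
      · have hpair := List.pairwise_iff_getElem.mp hts
          (pvFillA ts k' (w + strength) (k' - i) i d).1 ((pvFillA ts k' (w + strength) (k' - i) i d).1 + m)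
          (by omega) (by omega) (by omega)
        exact lt_of_lt_of_le hbase hpair
    have hr2sub : (pvFillA ts k' (w + strength) (k' - i) i d).2.Sublist (ts.take (pvFillA ts k' (w + strength) (k' - i) i d).1) := by
      rw [h3]
      have hseg2 : ((ts.take k').drop i).take ((pvFillA ts k' (w + strength) (k' - i) i d).1 - i)
          = (ts.drop i).take ((pvFillA ts k' (w + strength) (k' - i) i d).1 - i) := by
        rw [List.drop_take, List.take_take]
        congr 1
        omega
      have hsplit : ts.take (pvFillA ts k' (w + strength) (k' - i) i d).1
          = ts.take i ++ (ts.drop i).take ((pvFillA ts k' (w + strength) (k' - i) i d).1 - i) := by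
        rw [← List.take_add]
        congr 1
        omega
      rw [hsplit, hseg2]
      exact List.Sublist.append hsub (List.Sublist.refl _)
    rw [hseg]
    rw [pvGoA]
    cases hd' : (pvFillA ts k' (w + strength) (k' - i) i d).2 with
    | nil =>
      simp only [List.nil_append]
      cases hdrop : (ts.take k').drop (pvFillA ts k' (w + strength) (k' - i) i d).1 with
      | nil => simp [pvGoB]
      | cons t rl =>
        have htv : w + strength < t := hrest_gt t (by rw [hdrop]; exact List.mem_cons_self)
        simp [pvGoB, htv]
    | cons t dt =>
      rw [hd'] at hr2le hr2sub
      have htv : t ≤ w + strength := hr2le t List.mem_cons_self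
      simp only [List.cons_append]
      rw [pvGoB]
      have hnotlt : ¬ (w + strength < t) := not_lt.mpr htv
      rw [if_neg hnotlt]
      by_cases htw : t ≤ w
      · rw [if_pos htw, if_pos htw]
        exact ih (pvFillA ts k' (w + strength) (k' - i) i d).1 p dt hrest h2
          ((List.sublist_cons_self t dt).trans hr2sub)
          (fun x hx w' hw' => le_trans
            (hr2le x (List.mem_cons_of_mem t hx))
            (by have := hwr w' hw'; omega))
      · rw [if_neg htw, if_neg htw]
        by_cases hp : p = 0
        · rw [if_pos hp, if_pos hp]
          rfl
        · rw [if_neg hp, if_neg hp]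
          have hremsort : ((t :: dt) ++ (ts.take k').drop (pvFillA ts k' (w + strength) (k' - i) i d).1).Pairwise (· ≤ ·) := by
            have hsubrem : ((t :: dt) ++ (ts.take k').drop (pvFillA ts k' (w + strength) (k' - i) i d).1).Sublist (ts.take k') := by
              have hstep : ((t :: dt) ++ (ts.take k').drop (pvFillA ts k' (w + strength) (k' - i) i d).1).Sublist
                  (ts.take (pvFillA ts k' (w + strength) (k' - i) i d).1
                    ++ (ts.take k').drop (pvFillA ts k' (w + strength) (k' - i) i d).1) :=
                List.Sublist.append hr2sub (List.Sublist.refl _)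
              have heq : ts.take (pvFillA ts k' (w + strength) (k' - i) i d).1
                  ++ (ts.take k').drop (pvFillA ts k' (w + strength) (k' - i) i d).1 = ts.take k' := by
                have h1 : (ts.take k').take (pvFillA ts k' (w + strength) (k' - i) i d).1
                    = ts.take (pvFillA ts k' (w + strength) (k' - i) i d).1 := by
                  rw [List.take_take]
                  congr 1
                  omega
                rw [← h1, List.take_append_drop]
              exact hstep.trans (by rw [heq])
            exact List.Pairwise.sublist hsubrem
              (List.Pairwise.sublist (List.take_sublist _ _) hts)
          have hbis := pvBisect_decomp (t :: dt)
            ((ts.take k').drop (pvFillA ts k' (w + strength) (k' - i) i d).1) (w + strength)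
            hremsort hr2le hrest_gt
          have hback : t :: (dt ++ (ts.take k').drop (pvFillA ts k' (w + strength) (k' - i) i d).1)
              = (t :: dt) ++ (ts.take k').drop (pvFillA ts k' (w + strength) (k' - i) i d).1 := rfl
          rw [hback, hbis]
          have herase : ((t :: dt) ++ (ts.take k').drop (pvFillA ts k' (w + strength) (k' - i) i d).1).eraseIdx ((t :: dt).length - 1)
              = (t :: dt).dropLast ++ (ts.take k').drop (pvFillA ts k' (w + strength) (k' - i) i d).1 := by
            rw [List.eraseIdx_append_of_lt_length (by simp) _]
            rw [pvEraseIdx_last]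
          rw [herase]
          exact ih (pvFillA ts k' (w + strength) (k' - i) i d).1 (p - 1) ((t :: dt).dropLast) hrest h2
            ((List.dropLast_sublist _).trans hr2sub)
            (fun x hx w' hw' => le_trans
              (hr2le x (List.mem_of_mem_dropLast hx))
              (by have := hwr w' hw'; omega))

theorem pvCheck_eq (ts ws : List Int) (pills strength : Int)
    (hts : ts.Pairwise (· ≤ ·)) (hws : ws.Pairwise (· ≤ ·)) :
    ∀ k : Nat, k < min ts.length ws.length →
      pvCheckA ts ws pills strength k = ! pvFeasibleB ts ws pills strength (k + 1) := by
  intro k hkm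
  unfold pvCheckA pvFeasibleB
  rw [PySem.List.slice_from_neg_natCast ws (k + 1) (by omega)]
  have h := pvGoAB ts (k + 1) strength hts (by omega)
    (ws.drop (ws.length - (k + 1))) 0 pills []
    (List.Pairwise.sublist (List.drop_sublist _ _) hws)
    (by omega) (by simp) (by simp)
  simpa using h

theorem pvSearch_eq (ch fe : Nat → Bool) :
    ∀ (n lo hi : Nat), hi - lo ≤ n → (∀ j, j < hi → ch j = ! fe (j + 1)) →
      pvBisectA ch n lo hi = pvSearchB fe n lo hi := by
  intro n
  induction n with
  | zero =>
    intro lo hi hn hch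
    rfl
  | succ n ih =>
    intro lo hi hn hch
    show (if lo < hi then _ else _) = (if lo < hi then _ else _)
    by_cases hlh : lo < hi
    · simp only [if_pos hlh]
      have hmid : (lo + hi) / 2 < hi := by omega
      have hmid2 : lo ≤ (lo + hi) / 2 := by omega
      have hch' := hch ((lo + hi) / 2) hmid
      cases hfe : fe ((lo + hi) / 2 + 1)
      · rw [hfe] at hch'
        rw [hch']
        simp only [Bool.not_false, if_true, if_neg (by simp : ¬ (false = true))]
        exact ih lo ((lo + hi) / 2) (by omega) (fun j hj => hch j (by omega))
      · rw [hfe] at hch'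
        rw [hch']
        simp only [Bool.not_true, if_neg (by simp : ¬ (false = true))]
        exact ih ((lo + hi) / 2 + 1) hi (by omega) hch
    · simp [hlh]

-- ===== VERDICT (by name: the statement is the Claim_ definition above) =====
theorem maxTaskAssign_spec : Claim_equal_maxTaskAssign := by
  intro tasks workers pills strength _
  unfold Spec_maxTaskAssign maxTaskAssign maxTaskAssign_alt
  have h := pvSearch_eq (pvCheckA (PySem.List.sorted tasks (fun x => x)) (PySem.List.sorted workers (fun x => x)) pills strength)
      (pvFeasibleB (PySem.List.sorted tasks (fun x => x)) (PySem.List.sorted workers (fun x => x)) pills strength)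
      (min (PySem.List.sorted tasks (fun x => x)).length (PySem.List.sorted workers (fun x => x)).length)
      0 (min (PySem.List.sorted tasks (fun x => x)).length (PySem.List.sorted workers (fun x => x)).length)
      (by omega) ?_
  · simp only [h]
  · intro j hj
    exact pvCheck_eq _ _ pills strength
      (PySem.List.sorted_pairwise tasks (fun x => x))
      (PySem.List.sorted_pairwise workers (fun x => x)) j (by omega)
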